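-- pv_equiv track=rewrite | github.com/twesterhout/correlated-hoppings | correlated_hoppings/system.py | simple_square_lattice_edges
-- ===== SOURCE A (Python) =====
-- from typing import Any, List, Tuple
--
-- def are_edges_ordered(edges: List[Tuple[int, int]]) -> bool:
--     return all(map(lambda t: t[0] < t[1], edges))
--
-- def simple_square_lattice_edges(shape: Tuple[int, int]) -> List[Tuple[int, int]]:
--     def index(x: int, y: int) -> int:
--         return (y % shape[0]) * shape[1] + (x % shape[1])
--
--     edges: List[Tuple[int, int]] = []
--     for y in range(shape[0]):
--         for x in range(shape[1]):
--             i = index(x, y)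
--             edges.append((i, index(x + 1, y)))
--             edges.append((i, index(x, y + 1)))
--
--     def order_edge(edge: Tuple[int, int]) -> Tuple[int, int]:
--         (i, j) = edge
--         return (i, j) if i < j else (j, i)
--
--     edges = sorted(map(order_edge, edges))
--     assert are_edges_ordered(edges)
--     return edges
-- ===== SOURCE B (Python) =====
-- def simple_square_lattice_edges(shape):
--     # Emit edges directly in sorted order, no sort needed.
--     N, M = shape[0], shape[1]
--     edges = []
--     for y in range(N):
--         for x in range(M):
--             a = y * M + x
--             if x < M - 1:
--                 edges.append((a, a + 1))
--             if x == 0: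
--                 edges.append((a, a + M - 1))
--             if y < N - 1:
--                 edges.append((a, a + M))
--             if y == 0:
--                 edges.append((a, (N - 1) * M + x))
--     return edges
-- ===== Notes on version B (the rewrite author's own statement) =====
-- stated objective: faster
-- what changed: B emits each ordered edge directly at its final sorted position (grouping the two wrap-around edges of each row/column with their smaller endpoint) in one pass, eliminating the order_edge mapping pass and the O(E log E) sort; intended as faster, measured ~3.2x at the largest size both finished.
-- outside the precondition, e.g. on simple_square_lattice_edges((0,)): A returns [], B raises IndexError; on simple_square_lattice_edges((1,)): A raises IndexError, B raises IndexError; on simple_square_lattice_edges(()): A raises IndexError, B raises IndexError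
import Mathlib
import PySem

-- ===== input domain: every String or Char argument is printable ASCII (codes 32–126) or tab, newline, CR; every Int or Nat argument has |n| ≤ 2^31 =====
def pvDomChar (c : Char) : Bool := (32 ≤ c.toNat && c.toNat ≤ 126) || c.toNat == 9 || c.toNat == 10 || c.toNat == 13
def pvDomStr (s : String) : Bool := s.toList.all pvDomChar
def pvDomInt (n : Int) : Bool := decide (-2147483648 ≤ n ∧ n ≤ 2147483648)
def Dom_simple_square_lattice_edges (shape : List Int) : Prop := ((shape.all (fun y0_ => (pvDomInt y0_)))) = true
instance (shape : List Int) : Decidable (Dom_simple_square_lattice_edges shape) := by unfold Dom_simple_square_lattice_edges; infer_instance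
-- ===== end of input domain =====

-- B builds each ordered edge directly at its final sorted position in one pass, removing A's sort;
-- intended as faster (a timing run measured ~3.2x at the largest size both versions finished).

-- ===== PORT A =====
def pvOrderEdge (edge : List Int) : List Int :=
  match edge with
  | [i, j] => if i < j then [i, j] else [j, i]
  | e => e

def simple_square_lattice_edges (shape : List Int) : List (List Int) :=
  let s0 : Int := (PySem.List.pyGet? shape 0).getD 0
  let s1 : Int := (PySem.List.pyGet? shape 1).getD 0
  let index : Int → Int → Int := fun x y => PySem.Int.mod y s0 * s1 + PySem.Int.mod x s1
  let edges : List (List Int) :=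
    (PySem.List.pyRange 0 s0 1).foldl (fun acc y =>
      (PySem.List.pyRange 0 s1 1).foldl (fun acc x =>
        acc ++ [[index x y, index (x + 1) y], [index x y, index x (y + 1)]]) acc) []
  PySem.List.sorted (edges.map pvOrderEdge) (fun e => e) false

-- ===== PORT B =====
def simple_square_lattice_edges_alt (shape : List Int) : List (List Int) :=
  let n : Int := (PySem.List.pyGet? shape 0).getD 0
  let m : Int := (PySem.List.pyGet? shape 1).getD 0
  (PySem.List.pyRange 0 n 1).foldl (fun acc y =>
    (PySem.List.pyRange 0 m 1).foldl (fun acc x =>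
      let a := y * m + x
      let acc1 := if x < m - 1 then acc ++ [[a, a + 1]] else acc
      let acc2 := if x = 0 then acc1 ++ [[a, a + m - 1]] else acc1
      let acc3 := if y < n - 1 then acc2 ++ [[a, a + m]] else acc2
      if y = 0 then acc3 ++ [[a, (n - 1) * m + x]] else acc3) acc) []

-- ===== PRECONDITION & SPEC =====
-- Pre_ excludes shapes with fewer than two entries — there A raises IndexError, except when the first
-- entry is ≤ 0, where A returns [] before ever reading shape[1] while B reads shape[1] up front and
-- raises IndexError — and shapes whose two positive dimensions include a 1, on which A's
-- `assert are_edges_ordered` fails (a self-loop edge appears) so A raises AssertionError.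
def Pre_simple_square_lattice_edges (shape : List Int) : Prop :=
  2 ≤ shape.length ∧
    (shape.getD 0 0 ≤ 0 ∨ shape.getD 1 0 ≤ 0 ∨ (2 ≤ shape.getD 0 0 ∧ 2 ≤ shape.getD 1 0))
instance (shape : List Int) : Decidable (Pre_simple_square_lattice_edges shape) := by
  unfold Pre_simple_square_lattice_edges; infer_instance

def pvWitness_simple_square_lattice_edges : List Int := [2, 3]

def Spec_simple_square_lattice_edges (shape : List Int) (out : List (List Int)) : Prop :=
  out = simple_square_lattice_edges_alt shape
instance (shape : List Int) (out : List (List Int)) : Decidable (Spec_simple_square_lattice_edges shape out) := by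
  unfold Spec_simple_square_lattice_edges; infer_instance

-- ===== CLAIM (what is proved, stated in full; the proofs are below) =====
def Claim_equal_simple_square_lattice_edges : Prop :=
  ∀ (shape : List Int), Dom_simple_square_lattice_edges shape →
    Pre_simple_square_lattice_edges shape →
    Spec_simple_square_lattice_edges shape (simple_square_lattice_edges shape)

-- ===== LEMMAS AND PROOFS =====

-- A's body as a function of the two shape entries
def pvAfun (s0 s1 : Int) : List (List Int) :=
  let index : Int → Int → Int := fun x y => PySem.Int.mod y s0 * s1 + PySem.Int.mod x s1
  let edges : List (List Int) :=
    (PySem.List.pyRange 0 s0 1).foldl (fun acc y =>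
      (PySem.List.pyRange 0 s1 1).foldl (fun acc x =>
        acc ++ [[index x y, index (x + 1) y], [index x y, index x (y + 1)]]) acc) []
  PySem.List.sorted (edges.map pvOrderEdge) (fun e => e) false

def pvBfun (n m : Int) : List (List Int) :=
  (PySem.List.pyRange 0 n 1).foldl (fun acc y =>
    (PySem.List.pyRange 0 m 1).foldl (fun acc x =>
      let a := y * m + x
      let acc1 := if x < m - 1 then acc ++ [[a, a + 1]] else acc
      let acc2 := if x = 0 then acc1 ++ [[a, a + m - 1]] else acc1
      let acc3 := if y < n - 1 then acc2 ++ [[a, a + m]] else acc2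
      if y = 0 then acc3 ++ [[a, (n - 1) * m + x]] else acc3) acc) []

lemma portA_eq (shape : List Int) :
    simple_square_lattice_edges shape
      = pvAfun ((PySem.List.pyGet? shape 0).getD 0) ((PySem.List.pyGet? shape 1).getD 0) := rfl

lemma portB_eq (shape : List Int) :
    simple_square_lattice_edges_alt shape
      = pvBfun ((PySem.List.pyGet? shape 0).getD 0) ((PySem.List.pyGet? shape 1).getD 0) := rfl

lemma pvGet_eq (shape : List Int) (h : 2 ≤ shape.length) :
    (PySem.List.pyGet? shape 0).getD 0 = shape.getD 0 0 ∧
    (PySem.List.pyGet? shape 1).getD 0 = shape.getD 1 0 := by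
  match shape, h with
  | a :: b :: t, _ =>
    constructor <;> simp [PySem.List.pyGet?, PySem.List.pyIdx?] <;>
      rw [if_pos (by positivity)] <;> simp

-- per-cell group of B's edges, and the canonical (sorted) edge list
def pvG (n m y x : Int) : List (List Int) :=
  (if x < m - 1 then [[y * m + x, y * m + x + 1]] else []) ++
  (if x = 0 then [[y * m + x, y * m + x + m - 1]] else []) ++
  (if y < n - 1 then [[y * m + x, y * m + x + m]] else []) ++
  (if y = 0 then [[y * m + x, (n - 1) * m + x]] else [])

def pvCanon (n m : Int) : List (List Int) :=
  (PySem.List.pyRange 0 n 1).flatMap (fun y => (PySem.List.pyRange 0 m 1).flatMap (pvG n m y))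

-- the four global edge families
def pvCons (n m : Int) : List (List Int) :=
  (PySem.List.pyRange 0 n 1).flatMap (fun y =>
    (PySem.List.pyRange 0 (m - 1) 1).flatMap (fun x => [[y * m + x, y * m + x + 1]]))
def pvWrapR (n m : Int) : List (List Int) :=
  (PySem.List.pyRange 0 n 1).flatMap (fun y => [[y * m, y * m + m - 1]])
def pvDown (n m : Int) : List (List Int) :=
  (PySem.List.pyRange 0 (n - 1) 1).flatMap (fun y =>
    (PySem.List.pyRange 0 m 1).flatMap (fun x => [[y * m + x, y * m + x + m]]))
def pvWrapD (n m : Int) : List (List Int) :=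
  (PySem.List.pyRange 0 m 1).flatMap (fun x => [[x, (n - 1) * m + x]])

-- basic loop/list lemmas
lemma foldl_id {α β : Type} (l : List α) (a : β) : l.foldl (fun acc _ => acc) a = a := by
  induction l generalizing a <;> simp_all [List.foldl]

lemma foldl_hom {α β : Type} (l : List α) (f : List β → α → List β) (g : α → List β)
    (h : ∀ acc x, f acc x = acc ++ g x) (acc : List β) :
    l.foldl f acc = acc ++ l.flatMap g := by
  induction l generalizing acc with
  | nil => simp
  | cons a t ih => rw [List.foldl_cons, h, ih, List.flatMap_cons, List.append_assoc]

lemma perm_flatMap_of_forall {α β : Type} (l : List α) (f g : α → List β)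
    (h : ∀ x ∈ l, (f x).Perm (g x)) : (l.flatMap f).Perm (l.flatMap g) := by
  induction l with
  | nil => exact List.Perm.refl _
  | cons a t ih =>
    simp only [List.flatMap_cons]
    exact (h a (by simp)).append (ih (fun x hx => h x (by simp [hx])))

lemma perm_flatMap_append {α β : Type} (l : List α) (f g : α → List β) :
    (l.flatMap (fun x => f x ++ g x)).Perm (l.flatMap f ++ l.flatMap g) := by
  induction l with
  | nil => simp
  | cons a t ih =>
    simp only [List.flatMap_cons]
    rw [← Multiset.coe_eq_coe] at ih ⊢
    simp only [← Multiset.coe_add] at ih ⊢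
    rw [ih]; abel

lemma perm_flatMap_append4 {α β : Type} (l : List α) (f1 f2 f3 f4 : α → List β) :
    (l.flatMap (fun x => f1 x ++ f2 x ++ f3 x ++ f4 x)).Perm
      (l.flatMap f1 ++ l.flatMap f2 ++ l.flatMap f3 ++ l.flatMap f4) := by
  induction l with
  | nil => simp
  | cons a t ih =>
    simp only [List.flatMap_cons]
    rw [← Multiset.coe_eq_coe] at ih ⊢
    simp only [← Multiset.coe_add] at ih ⊢
    rw [ih]; abel

lemma flatMap_ite_const {α β : Type} (l : List α) (c : Prop) [Decidable c] (u v : α → List β) :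
    (l.flatMap fun x => if c then u x else v x) = if c then l.flatMap u else l.flatMap v := by
  split <;> rfl

lemma pvFlat_if_split {β : Type} (a m b : Int) (h1 : a ≤ m) (h2 : m ≤ b) (u v : Int → List β) :
    (PySem.List.pyRange a b 1).flatMap (fun x => if x < m then u x else v x)
      = (PySem.List.pyRange a m 1).flatMap u ++ (PySem.List.pyRange m b 1).flatMap v := by
  rw [PySem.List.pyRange_one_append a m b h1 h2, List.flatMap_append]
  congr 1
  · refine List.flatMap_congr ?_
    intro x hx; rw [PySem.List.mem_pyRange_one] at hx; rw [if_pos hx.2]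
  · refine List.flatMap_congr ?_
    intro x hx; rw [PySem.List.mem_pyRange_one] at hx; rw [if_neg (by omega)]

lemma pvFlat_if_zero {β : Type} (b : Int) (h : 1 ≤ b) (f : Int → List β) :
    (PySem.List.pyRange 0 b 1).flatMap (fun x => if x = 0 then f x else []) = f 0 := by
  rw [PySem.List.pyRange_one_append 0 1 b (by omega) h, List.flatMap_append]
  have e1 : PySem.List.pyRange 0 1 1 = [0] := by
    simpa using PySem.List.pyRange_one_singleton (0 : Int)
  have e2 : (PySem.List.pyRange 1 b 1).flatMap (fun x => if x = 0 then f x else ([] : List β)) = [] := by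
    rw [List.flatMap_eq_nil_iff]
    intro x hx; rw [PySem.List.mem_pyRange_one] at hx; rw [if_neg (by omega)]
  rw [e1, e2]; simp

lemma pyRange_pred_singleton (b : Int) : PySem.List.pyRange (b - 1) b 1 = [b - 1] := by
  have := PySem.List.pyRange_one_singleton (b - 1)
  rw [show b - 1 + 1 = b by ring] at this
  exact this

-- trivial-dimension cases
lemma pvAfun_nil (s0 s1 : Int) (h : s0 ≤ 0 ∨ s1 ≤ 0) : pvAfun s0 s1 = [] := by
  unfold pvAfun
  rcases h with h | h <;>
    simp only [PySem.List.pyRange_one_eq_nil h, List.foldl_nil, foldl_id, List.map_nil] <;> rfl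

lemma pvBfun_nil (n m : Int) (h : n ≤ 0 ∨ m ≤ 0) : pvBfun n m = [] := by
  unfold pvBfun
  rcases h with h | h
  · rw [PySem.List.pyRange_one_eq_nil h]; rfl
  · simp only [PySem.List.pyRange_one_eq_nil h, List.foldl_nil]
    exact foldl_id _ _

lemma pvBfun_eq_canon (n m : Int) : pvBfun n m = pvCanon n m := by
  unfold pvBfun pvCanon
  refine (foldl_hom _ _ (fun y => (PySem.List.pyRange 0 m 1).flatMap (pvG n m y)) ?_ []).trans
    (List.nil_append _)
  intro acc y
  refine foldl_hom _ _ _ ?_ acc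
  intro acc x
  simp only [pvG]
  split_ifs <;> simp

-- lexicographic order on 2-element Int lists
lemma pair_le_iff (a b c d : Int) : ([a, b] ≤ [c, d]) ↔ (a < c ∨ (a = c ∧ b ≤ d)) := by
  constructor
  · intro h
    rcases lt_or_eq_of_le h with h | h
    · rw [List.cons_lt_cons_iff] at h
      rcases h with h | ⟨h1, h2⟩
      · exact Or.inl h
      · rw [List.cons_lt_cons_iff] at h2
        rcases h2 with h2 | ⟨h2, h3⟩
        · exact Or.inr ⟨h1, le_of_lt h2⟩
        · cases h3
    · injection h with h1 h2; injection h2 with h2 _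
      exact Or.inr ⟨h1, le_of_eq h2⟩
  · rintro (h | ⟨rfl, h⟩)
    · exact le_of_lt (by rw [List.cons_lt_cons_iff]; exact Or.inl h)
    · rcases lt_or_eq_of_le h with h | rfl
      · exact le_of_lt (by rw [List.cons_lt_cons_iff]
                           exact Or.inr ⟨rfl, by rw [List.cons_lt_cons_iff]; exact Or.inl h⟩)
      · exact le_refl _

lemma pvG_first (n m y x : Int) (e : List Int) (he : e ∈ pvG n m y x) :
    ∃ b, e = [y * m + x, b] := by
  unfold pvG at he
  split_ifs at he <;> simp_all <;> tauto

lemma pvG_pairwise (n m y x : Int) (hn : 2 ≤ n) (hm : 2 ≤ m)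
    (hy0 : 0 ≤ y) (hy1 : y < n) (hx0 : 0 ≤ x) (hx1 : x < m) :
    (pvG n m y x).Pairwise (· ≤ ·) := by
  rcases eq_or_ne y 0 with rfl | hy
  · have hQ : m ≤ (n - 1) * m := by nlinarith
    unfold pvG
    split_ifs <;> simp [List.pairwise_cons, pair_le_iff] <;> omega
  · unfold pvG
    rw [if_neg hy]
    split_ifs <;> simp [List.pairwise_cons, pair_le_iff] <;> omega

lemma pvG_cross (n m y1 x1 y2 x2 : Int) (hlt : y1 * m + x1 < y2 * m + x2) :
    ∀ e ∈ pvG n m y1 x1, ∀ e' ∈ pvG n m y2 x2, e ≤ e' := by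
  intro e he e' he'
  obtain ⟨b1, rfl⟩ := pvG_first n m y1 x1 e he
  obtain ⟨b2, rfl⟩ := pvG_first n m y2 x2 e' he'
  rw [pair_le_iff]
  exact Or.inl hlt

lemma pvCanon_pairwise (n m : Int) (hn : 2 ≤ n) (hm : 2 ≤ m) :
    (pvCanon n m).Pairwise (· ≤ ·) := by
  unfold pvCanon
  rw [List.pairwise_flatMap]
  constructor
  · intro y hy
    rw [PySem.List.mem_pyRange_one] at hy
    rw [List.pairwise_flatMap]
    constructor
    · intro x hx
      rw [PySem.List.mem_pyRange_one] at hx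
      exact pvG_pairwise n m y x hn hm hy.1 hy.2 hx.1 hx.2
    · have h : ∀ x1 x2 : Int, x1 < x2 →
          ∀ e ∈ pvG n m y x1, ∀ e' ∈ pvG n m y x2, e ≤ e' := by
        intro x1 x2 h12
        exact pvG_cross n m y x1 y x2 (by omega)
      exact List.Pairwise.imp (fun {x1 x2} hlt => h x1 x2 hlt)
        (PySem.List.pairwise_lt_pyRange_one 0 m)
  · have h : ∀ y1 y2 : Int, 0 ≤ y1 → y1 < y2 → y2 < n →
        ∀ e ∈ (PySem.List.pyRange 0 m 1).flatMap (pvG n m y1),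
        ∀ e' ∈ (PySem.List.pyRange 0 m 1).flatMap (pvG n m y2), e ≤ e' := by
      intro y1 y2 hy1 h12 hy2 e he e' he'
      rw [List.mem_flatMap] at he he'
      obtain ⟨x1, hx1, he⟩ := he
      obtain ⟨x2, hx2, he'⟩ := he'
      rw [PySem.List.mem_pyRange_one] at hx1 hx2
      have harith : y1 * m + x1 < y2 * m + x2 := by nlinarith
      exact pvG_cross n m y1 x1 y2 x2 harith e he e' he'
    refine List.Pairwise.imp_of_mem ?_ (PySem.List.pairwise_lt_pyRange_one 0 n)
    intro y1 y2 h1 h2 hlt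
    rw [PySem.List.mem_pyRange_one] at h1 h2
    exact h y1 y2 h1.1 hlt h2.2

-- Python's % for our in-range operands
lemma pvMod_self_lt (a b : Int) (h0 : 0 ≤ a) (h1 : a < b) : PySem.Int.mod a b = a := by
  rw [PySem.Int.mod_eq_emod_of_pos (by omega)]
  exact Int.emod_eq_of_lt h0 h1

-- evaluation of A's two ordered edges at one cell
lemma cellA_eq (n m y x : Int) (hn : 2 ≤ n) (hm : 2 ≤ m)
    (hy0 : 0 ≤ y) (hy1 : y < n) (hx0 : 0 ≤ x) (hx1 : x < m) :
    [pvOrderEdge [PySem.Int.mod y n * m + PySem.Int.mod x m,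
                  PySem.Int.mod y n * m + PySem.Int.mod (x + 1) m],
     pvOrderEdge [PySem.Int.mod y n * m + PySem.Int.mod x m,
                  PySem.Int.mod (y + 1) n * m + PySem.Int.mod x m]]
    = (if x < m - 1 then [[y * m + x, y * m + x + 1]] else [[y * m, y * m + m - 1]]) ++
      (if y < n - 1 then [[y * m + x, y * m + x + m]] else [[x, (n - 1) * m + x]]) := by
  have hy' : PySem.Int.mod y n = y := pvMod_self_lt y n hy0 hy1
  have hx' : PySem.Int.mod x m = x := pvMod_self_lt x m hx0 hx1
  rw [hy', hx']
  rcases lt_or_ge x (m - 1) with hxc | hxc <;> rcases lt_or_ge y (n - 1) with hyc | hyc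
  · rw [if_pos hxc, if_pos hyc, pvMod_self_lt (x + 1) m (by omega) (by omega),
        pvMod_self_lt (y + 1) n (by omega) (by omega)]
    simp only [pvOrderEdge, List.cons_append, List.nil_append]
    rw [if_pos (by omega), if_pos (by nlinarith)]
    refine congrArg₂ List.cons ?_ (congrArg₂ List.cons ?_ rfl) <;>
      refine congrArg₂ List.cons ?_ (congrArg₂ List.cons ?_ rfl) <;> ring
  · have hyeq : y = n - 1 := by omega
    rw [if_pos hxc, if_neg (by omega), pvMod_self_lt (x + 1) m (by omega) (by omega)]
    have e2 : PySem.Int.mod (y + 1) n = 0 := by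
      rw [hyeq, PySem.Int.mod_eq_emod_of_pos (by omega), show n - 1 + 1 = n by ring,
          Int.emod_self]
    rw [e2]
    simp only [pvOrderEdge, List.cons_append, List.nil_append]
    have hpos : 0 < (n - 1) * m := by nlinarith
    rw [if_pos (by omega), if_neg (by rw [hyeq]; push Not; nlinarith)]
    subst hyeq
    refine congrArg₂ List.cons ?_ (congrArg₂ List.cons ?_ rfl) <;>
      refine congrArg₂ List.cons ?_ (congrArg₂ List.cons ?_ rfl) <;> ring
  · have hxeq : x = m - 1 := by omega
    rw [if_neg (by omega), if_pos hyc, pvMod_self_lt (y + 1) n (by omega) (by omega)]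
    have e1 : PySem.Int.mod (x + 1) m = 0 := by
      rw [hxeq, PySem.Int.mod_eq_emod_of_pos (by omega), show m - 1 + 1 = m by ring,
          Int.emod_self]
    rw [e1]
    simp only [pvOrderEdge, List.cons_append, List.nil_append]
    rw [if_neg (by omega), if_pos (by nlinarith)]
    subst hxeq
    refine congrArg₂ List.cons ?_ (congrArg₂ List.cons ?_ rfl) <;>
      refine congrArg₂ List.cons ?_ (congrArg₂ List.cons ?_ rfl) <;> ring
  · have hxeq : x = m - 1 := by omega
    have hyeq : y = n - 1 := by omega
    rw [if_neg (by omega), if_neg (by omega)]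
    have e1 : PySem.Int.mod (x + 1) m = 0 := by
      rw [hxeq, PySem.Int.mod_eq_emod_of_pos (by omega), show m - 1 + 1 = m by ring,
          Int.emod_self]
    have e2 : PySem.Int.mod (y + 1) n = 0 := by
      rw [hyeq, PySem.Int.mod_eq_emod_of_pos (by omega), show n - 1 + 1 = n by ring,
          Int.emod_self]
    rw [e1, e2]
    simp only [pvOrderEdge, List.cons_append, List.nil_append]
    have hpos : 0 < (n - 1) * m := by nlinarith
    rw [if_neg (by omega), if_neg (by rw [hyeq]; push Not; nlinarith)]
    subst hxeq; subst hyeq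
    refine congrArg₂ List.cons ?_ (congrArg₂ List.cons ?_ rfl) <;>
      refine congrArg₂ List.cons ?_ (congrArg₂ List.cons ?_ rfl) <;> ring

-- the canonical list is a permutation of the four families
lemma pvCanon_perm_comps (n m : Int) (hn : 2 ≤ n) (hm : 2 ≤ m) :
    (pvCanon n m).Perm (pvCons n m ++ pvWrapR n m ++ pvDown n m ++ pvWrapD n m) := by
  unfold pvCanon
  have step1 : (pvCanon n m).Perm
      ((PySem.List.pyRange 0 n 1).flatMap (fun y =>
        ((PySem.List.pyRange 0 m 1).flatMap (fun x => if x < m - 1 then [[y * m + x, y * m + x + 1]] else []) ++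
         (PySem.List.pyRange 0 m 1).flatMap (fun x => if x = 0 then [[y * m + x, y * m + x + m - 1]] else []) ++
         (PySem.List.pyRange 0 m 1).flatMap (fun x => if y < n - 1 then [[y * m + x, y * m + x + m]] else []) ++
         (PySem.List.pyRange 0 m 1).flatMap (fun x => if y = 0 then [[y * m + x, (n - 1) * m + x]] else [])))) := by
    unfold pvCanon
    refine perm_flatMap_of_forall _ _ _ ?_
    intro y _
    exact perm_flatMap_append4 _ _ _ _ _
  refine step1.trans ((perm_flatMap_append4 _ _ _ _ _).trans ?_)
  have hCons : (PySem.List.pyRange 0 n 1).flatMap (fun y =>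
      (PySem.List.pyRange 0 m 1).flatMap (fun x =>
        if x < m - 1 then [[y * m + x, y * m + x + 1]] else [])) = pvCons n m := by
    refine List.flatMap_congr ?_
    intro y _
    rw [pvFlat_if_split 0 (m - 1) m (by omega) (by omega)]
    simp
  have hWrapR : (PySem.List.pyRange 0 n 1).flatMap (fun y =>
      (PySem.List.pyRange 0 m 1).flatMap (fun x =>
        if x = 0 then [[y * m + x, y * m + x + m - 1]] else [])) = pvWrapR n m := by
    refine List.flatMap_congr ?_
    intro y _
    rw [pvFlat_if_zero m (by omega)]
    norm_num
  have hDown : (PySem.List.pyRange 0 n 1).flatMap (fun y =>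
      (PySem.List.pyRange 0 m 1).flatMap (fun x =>
        if y < n - 1 then [[y * m + x, y * m + x + m]] else [])) = pvDown n m := by
    have : ∀ y : Int, (PySem.List.pyRange 0 m 1).flatMap (fun x =>
        if y < n - 1 then [[y * m + x, y * m + x + m]] else ([] : List (List Int)))
        = if y < n - 1 then (PySem.List.pyRange 0 m 1).flatMap
            (fun x => [[y * m + x, y * m + x + m]]) else [] := by
      intro y
      rw [flatMap_ite_const]
      split <;> simp
    rw [List.flatMap_congr (fun y _ => this y),
        pvFlat_if_split 0 (n - 1) n (by omega) (by omega)]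
    simp [pvDown]
  have hWrapD : (PySem.List.pyRange 0 n 1).flatMap (fun y =>
      (PySem.List.pyRange 0 m 1).flatMap (fun x =>
        if y = 0 then [[y * m + x, (n - 1) * m + x]] else [])) = pvWrapD n m := by
    have : ∀ y : Int, (PySem.List.pyRange 0 m 1).flatMap (fun x =>
        if y = 0 then [[y * m + x, (n - 1) * m + x]] else ([] : List (List Int)))
        = if y = 0 then (PySem.List.pyRange 0 m 1).flatMap
            (fun x => [[y * m + x, (n - 1) * m + x]]) else [] := by
      intro y
      rw [flatMap_ite_const]
      split <;> simp
    rw [List.flatMap_congr (fun y _ => this y), pvFlat_if_zero n (by omega)]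
    simp [pvWrapD]
  rw [hCons, hWrapR, hDown, hWrapD]

-- A's mapped edge list equals the per-cell right/down groups
lemma pvLA_eq (n m : Int) (hn : 2 ≤ n) (hm : 2 ≤ m) :
    ((PySem.List.pyRange 0 n 1).flatMap (fun y => (PySem.List.pyRange 0 m 1).flatMap (fun x =>
        [pvOrderEdge [PySem.Int.mod y n * m + PySem.Int.mod x m,
                      PySem.Int.mod y n * m + PySem.Int.mod (x + 1) m],
         pvOrderEdge [PySem.Int.mod y n * m + PySem.Int.mod x m,
                      PySem.Int.mod (y + 1) n * m + PySem.Int.mod x m]])))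
    = ((PySem.List.pyRange 0 n 1).flatMap (fun y => (PySem.List.pyRange 0 m 1).flatMap (fun x =>
        (if x < m - 1 then [[y * m + x, y * m + x + 1]] else [[y * m, y * m + m - 1]]) ++
        (if y < n - 1 then [[y * m + x, y * m + x + m]] else [[x, (n - 1) * m + x]])))) := by
  refine List.flatMap_congr ?_
  intro y hy
  refine List.flatMap_congr ?_
  intro x hx
  rw [PySem.List.mem_pyRange_one] at hy hx
  exact cellA_eq n m y x hn hm hy.1 hy.2 hx.1 hx.2

lemma pvLA_perm_comps (n m : Int) (hn : 2 ≤ n) (hm : 2 ≤ m) :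
    (((PySem.List.pyRange 0 n 1).flatMap (fun y => (PySem.List.pyRange 0 m 1).flatMap (fun x =>
        (if x < m - 1 then [[y * m + x, y * m + x + 1]] else [[y * m, y * m + m - 1]]) ++
        (if y < n - 1 then [[y * m + x, y * m + x + m]] else [[x, (n - 1) * m + x]]))))).Perm
      (pvCons n m ++ pvWrapR n m ++ pvDown n m ++ pvWrapD n m) := by
  have step1 := perm_flatMap_of_forall (PySem.List.pyRange 0 n 1) _
    (fun y => ((PySem.List.pyRange 0 m 1).flatMap (fun x =>
        if x < m - 1 then [[y * m + x, y * m + x + 1]] else [[y * m, y * m + m - 1]]) ++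
      (PySem.List.pyRange 0 m 1).flatMap (fun x =>
        if y < n - 1 then [[y * m + x, y * m + x + m]] else [[x, (n - 1) * m + x]])))
    (fun y _ => perm_flatMap_append _ _ _)
  refine step1.trans ((perm_flatMap_append _ _ _).trans ?_)
  have hR : (PySem.List.pyRange 0 n 1).flatMap (fun y =>
      (PySem.List.pyRange 0 m 1).flatMap (fun x =>
        if x < m - 1 then [[y * m + x, y * m + x + 1]] else [[y * m, y * m + m - 1]])) =
      (PySem.List.pyRange 0 n 1).flatMap (fun y =>
        ((PySem.List.pyRange 0 (m - 1) 1).flatMap (fun x => [[y * m + x, y * m + x + 1]]) ++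
          [[y * m, y * m + m - 1]])) := by
    refine List.flatMap_congr ?_
    intro y _
    rw [pvFlat_if_split 0 (m - 1) m (by omega) (by omega), pyRange_pred_singleton m]
    simp
  have hD : (PySem.List.pyRange 0 n 1).flatMap (fun y =>
      (PySem.List.pyRange 0 m 1).flatMap (fun x =>
        if y < n - 1 then [[y * m + x, y * m + x + m]] else [[x, (n - 1) * m + x]]))
      = pvDown n m ++ pvWrapD n m := by
    have : ∀ y : Int, (PySem.List.pyRange 0 m 1).flatMap (fun x =>
        if y < n - 1 then [[y * m + x, y * m + x + m]] else [[x, (n - 1) * m + x]])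
        = if y < n - 1 then (PySem.List.pyRange 0 m 1).flatMap
            (fun x => [[y * m + x, y * m + x + m]])
          else (PySem.List.pyRange 0 m 1).flatMap (fun x => [[x, (n - 1) * m + x]]) := by
      intro y; rw [flatMap_ite_const]
    rw [List.flatMap_congr (fun y _ => this y),
        pvFlat_if_split 0 (n - 1) n (by omega) (by omega), pyRange_pred_singleton n]
    simp [pvDown, pvWrapD]
  rw [hR, hD]
  rw [← Multiset.coe_eq_coe]
  have hsplit := perm_flatMap_append (PySem.List.pyRange 0 n 1)
    (fun y => (PySem.List.pyRange 0 (m - 1) 1).flatMap (fun x => [[y * m + x, y * m + x + 1]]))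
    (fun y => [[y * m, y * m + m - 1]])
  rw [← Multiset.coe_eq_coe] at hsplit
  simp only [← Multiset.coe_add] at hsplit ⊢
  rw [hsplit]
  show _ = ((pvCons n m : Multiset (List Int)) + pvWrapR n m + pvDown n m + pvWrapD n m)
  unfold pvCons pvWrapR
  abel

lemma pvAfun_eq_canon (n m : Int) (hn : 2 ≤ n) (hm : 2 ≤ m) : pvAfun n m = pvCanon n m := by
  unfold pvAfun
  show PySem.List.sorted
      (((PySem.List.pyRange 0 n 1).foldl (fun acc y =>
        (PySem.List.pyRange 0 m 1).foldl (fun acc x =>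
          acc ++ [[PySem.Int.mod y n * m + PySem.Int.mod x m,
                   PySem.Int.mod y n * m + PySem.Int.mod (x + 1) m],
                  [PySem.Int.mod y n * m + PySem.Int.mod x m,
                   PySem.Int.mod (y + 1) n * m + PySem.Int.mod x m]]) acc) []).map pvOrderEdge)
      (fun e => e) false = pvCanon n m
  rw [foldl_hom _ _ (fun y => (PySem.List.pyRange 0 m 1).flatMap (fun x =>
      [[PySem.Int.mod y n * m + PySem.Int.mod x m,
        PySem.Int.mod y n * m + PySem.Int.mod (x + 1) m],
       [PySem.Int.mod y n * m + PySem.Int.mod x m,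
        PySem.Int.mod (y + 1) n * m + PySem.Int.mod x m]]))
    (fun acc y => foldl_hom _ _ _ (fun acc x => rfl) acc) []]
  rw [List.nil_append, List.map_flatMap]
  have hmap : ∀ y : Int, ((PySem.List.pyRange 0 m 1).flatMap (fun x =>
      [[PySem.Int.mod y n * m + PySem.Int.mod x m,
        PySem.Int.mod y n * m + PySem.Int.mod (x + 1) m],
       [PySem.Int.mod y n * m + PySem.Int.mod x m,
        PySem.Int.mod (y + 1) n * m + PySem.Int.mod x m]])).map pvOrderEdge
      = (PySem.List.pyRange 0 m 1).flatMap (fun x =>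
        [pvOrderEdge [PySem.Int.mod y n * m + PySem.Int.mod x m,
                      PySem.Int.mod y n * m + PySem.Int.mod (x + 1) m],
         pvOrderEdge [PySem.Int.mod y n * m + PySem.Int.mod x m,
                      PySem.Int.mod (y + 1) n * m + PySem.Int.mod x m]]) := by
    intro y
    rw [List.map_flatMap]
    rfl
  rw [List.flatMap_congr (fun y _ => hmap y)]
  rw [show (fun (a b : List Int) => a.decidableLT b)
        = (List.instLinearOrder : LinearOrder (List Int)).toDecidableLT from
      funext fun a => funext fun b => Subsingleton.elim _ _]
  refine PySem.List.sorted_id_eq_of_perm_of_pairwise _ _ ?_ ?_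
  · refine ((pvCanon_perm_comps n m hn hm).trans ?_)
    refine ((pvLA_perm_comps n m hn hm).symm).trans ?_
    rw [pvLA_eq n m hn hm]
  · exact pvCanon_pairwise n m hn hm

-- ===== VERDICT (by name: the statement is the Claim_ definition above) =====
theorem simple_square_lattice_edges_spec : Claim_equal_simple_square_lattice_edges := by
  intro shape _ hpre
  unfold Spec_simple_square_lattice_edges
  rw [portA_eq, portB_eq]
  obtain ⟨h0, h1⟩ := pvGet_eq shape hpre.1
  rw [h0, h1]
  rcases hpre.2 with h | h | ⟨hn, hm⟩
  · rw [pvAfun_nil _ _ (Or.inl h), pvBfun_nil _ _ (Or.inl h)]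
  · rw [pvAfun_nil _ _ (Or.inr h), pvBfun_nil _ _ (Or.inr h)]
  · rw [pvAfun_eq_canon _ _ hn hm, pvBfun_eq_canon]
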